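-- pv_equiv track=rewrite | github.com/Yollandaa/Honours-Project | dynamic_analysis.py | analyze_runtime_data
-- ===== SOURCE A (Python) =====
-- def analyze_runtime_data(runtime_data):
--     call_sequences = []
--     current_sequence = []
--
--     for event in runtime_data:
--         if event["event"] == "call":
--             current_sequence.append(event["func_name"])
--         elif event["event"] == "return":
--             # Convert the list to a tuple before appending
--             call_sequences.append(tuple(current_sequence))
--             current_sequence = []
--
--     return call_sequences
-- ===== SOURCE B (Python) =====
-- def analyze_runtime_data(runtime_data):
--     def first_return(events):
--         for i, e in enumerate(events):
--             if e["event"] == "return":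
--                 return i
--         return None
--
--     result = []
--     rest = runtime_data
--     i = first_return(rest)
--     while i is not None:
--         result.append(tuple(e["func_name"] for e in rest[:i] if e["event"] == "call"))
--         rest = rest[i + 1:]
--         i = first_return(rest)
--     return result
-- ===== Notes on version B (the rewrite author's own statement) =====
-- stated objective: alternative
-- what changed: Replaces A's single fused loop carrying a current-sequence accumulator by repeated splitting: find the first 'return', map the 'call' names of the segment before it, and recurse on the remainder (trailing events after the last return are never turned into a segment).
import Mathlib
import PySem

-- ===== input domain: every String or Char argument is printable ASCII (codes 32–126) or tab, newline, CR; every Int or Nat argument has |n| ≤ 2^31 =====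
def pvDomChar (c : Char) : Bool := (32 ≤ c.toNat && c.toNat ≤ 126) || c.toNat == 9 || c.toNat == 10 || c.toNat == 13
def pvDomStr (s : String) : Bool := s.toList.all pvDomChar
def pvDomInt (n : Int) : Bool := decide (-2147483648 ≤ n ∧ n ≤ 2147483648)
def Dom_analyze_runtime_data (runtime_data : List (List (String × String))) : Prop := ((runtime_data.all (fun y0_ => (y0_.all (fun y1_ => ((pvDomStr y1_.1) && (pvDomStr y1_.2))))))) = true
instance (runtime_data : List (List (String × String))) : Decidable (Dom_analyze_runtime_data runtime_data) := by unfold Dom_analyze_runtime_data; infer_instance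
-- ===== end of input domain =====

-- B replaces A's fused accumulator loop by repeated split-at-first-'return' with a per-segment map; same cost, different decomposition.


-- event["k"]: first-match lookup in the association list (Python dict access; none = KeyError, excluded by Pre_)
def evGet (ev : List (String × String)) (k : String) : Option String :=
  (ev.find? (fun p => p.1 == k)).map (·.2)

-- ===== PORT A =====
-- A's loop: fold over the events carrying (call_sequences, current_sequence).
def analyze_runtime_data (runtime_data : List (List (String × String))) : List (List String) :=
  (runtime_data.foldl
    (fun (st : List (List String) × List String) ev =>
      if (evGet ev "event").getD "" = "call" then
        (st.1, st.2 ++ [(evGet ev "func_name").getD ""])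
      else if (evGet ev "event").getD "" = "return" then
        (st.1 ++ [st.2], [])
      else st)
    ([], [])).1

-- ===== PORT B =====
-- first_return: index of the first 'return' event, none if there is none
def firstReturn (events : List (List (String × String))) : Option Nat :=
  events.findIdx? (fun e => (evGet e "event").getD "" = "return")

theorem firstReturn_lt {l : List (List (String × String))} {i : Nat}
    (h : firstReturn l = some i) : i < l.length :=
  (List.findIdx?_eq_some_iff_getElem.mp h).1

-- B's while loop: split at the first 'return', map the segment's 'call' names, recurse on the rest
def goB (rest : List (List (String × String))) : List (List String) :=
  match h : firstReturn rest with
  | none => []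
  | some i =>
      ((rest.take i).filter (fun e => (evGet e "event").getD "" = "call")).map
        (fun e => (evGet e "func_name").getD "")
      :: goB (rest.drop (i + 1))
  termination_by rest.length
  decreasing_by
    have := firstReturn_lt h
    simp [List.length_drop]; omega

def analyze_runtime_data_alt (runtime_data : List (List (String × String))) : List (List String) :=
  goB runtime_data

-- ===== PRECONDITION & SPEC =====
-- Pre_ excludes exactly the inputs on which A raises KeyError: some event lacks the "event"
-- key, or a "call" event lacks the "func_name" key.
def Pre_analyze_runtime_data (runtime_data : List (List (String × String))) : Prop :=
  ∀ ev ∈ runtime_data, (evGet ev "event").isSome ∧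
    (evGet ev "event" = some "call" → (evGet ev "func_name").isSome)
instance (runtime_data : List (List (String × String))) : Decidable (Pre_analyze_runtime_data runtime_data) := by unfold Pre_analyze_runtime_data; infer_instance

def pvWitness_analyze_runtime_data : (List (List (String × String))) :=
  [[("event", "call"), ("func_name", "f")], [("event", "line")],
   [("event", "call"), ("func_name", "g")], [("event", "return")]]

def Spec_analyze_runtime_data (runtime_data : List (List (String × String))) (out : List (List String)) : Prop := out = analyze_runtime_data_alt runtime_data
instance (runtime_data : List (List (String × String))) (out : List (List String)) : Decidable (Spec_analyze_runtime_data runtime_data out) := by unfold Spec_analyze_runtime_data; infer_instance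

-- ===== CLAIM (what is proved, stated in full; the proofs are below) =====
def Claim_equal_analyze_runtime_data : Prop := ∀ (runtime_data : List (List (String × String))), Dom_analyze_runtime_data runtime_data → Pre_analyze_runtime_data runtime_data → Spec_analyze_runtime_data runtime_data (analyze_runtime_data runtime_data)

-- ===== LEMMAS AND PROOFS =====

-- recursive form of A's loop
def fA (cur : List String) : List (List (String × String)) → List (List String)
  | [] => []
  | ev :: rest =>
      if (evGet ev "event").getD "" = "call" then
        fA (cur ++ [(evGet ev "func_name").getD ""]) rest
      else if (evGet ev "event").getD "" = "return" then
        cur :: fA [] rest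
      else fA cur rest

theorem foldl_fA (l : List (List (String × String))) :
    ∀ (acc : List (List String)) (cur : List String),
      (l.foldl
        (fun (st : List (List String) × List String) ev =>
          if (evGet ev "event").getD "" = "call" then
            (st.1, st.2 ++ [(evGet ev "func_name").getD ""])
          else if (evGet ev "event").getD "" = "return" then
            (st.1 ++ [st.2], [])
          else st)
        (acc, cur)).1 = acc ++ fA cur l := by
  induction l with
  | nil => simp [fA]
  | cons ev rest ih =>
      intro acc cur
      by_cases hc : (evGet ev "event").getD "" = "call"
      · simp [fA, hc, ih]
      · by_cases hr : (evGet ev "event").getD "" = "return"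
        · simp [fA, hr, ih]
        · simp [fA, hc, hr, ih]

theorem goB_nil : goB [] = [] := by
  rw [goB]; simp [firstReturn]

theorem goB_eq_none {l : List (List (String × String))}
    (h : firstReturn l = none) : goB l = [] := by
  rw [goB]; split
  · rfl
  · rename_i i h'; rw [h] at h'; cases h'

theorem goB_eq_some {l : List (List (String × String))} {i : Nat}
    (h : firstReturn l = some i) :
    goB l = ((l.take i).filter (fun e => (evGet e "event").getD "" = "call")).map
              (fun e => (evGet e "func_name").getD "")
            :: goB (l.drop (i + 1)) := by
  rw [goB]; split
  · rename_i h'; rw [h] at h'; cases h'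
  · rename_i j h'; rw [h] at h'; cases h'; rfl

theorem goB_cons (ev : List (String × String)) (rest : List (List (String × String))) :
    goB (ev :: rest) =
      if (evGet ev "event").getD "" = "return" then [] :: goB rest
      else
        match goB rest with
        | [] => []
        | s :: t =>
            ((if (evGet ev "event").getD "" = "call" then
                ((evGet ev "func_name").getD "") :: s
              else s) :: t) := by
  by_cases hr : (evGet ev "event").getD "" = "return"
  · have h0 : firstReturn (ev :: rest) = some 0 := by
      rw [firstReturn, List.findIdx?_cons]; simp [hr]
    rw [goB_eq_some h0]
    simp [hr]
  · rw [if_neg hr]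
    cases hj : List.findIdx? (fun e => decide ((evGet e "event").getD "" = "return")) rest with
    | none =>
        have h1 : firstReturn (ev :: rest) = none := by
          rw [firstReturn, List.findIdx?_cons]; simp only [hr, decide_false, Bool.false_eq_true, if_false, Option.map_eq_none_iff]
          exact hj
        rw [goB_eq_none h1, goB_eq_none hj]
    | some j =>
        have h1 : firstReturn (ev :: rest) = some (j + 1) := by
          rw [firstReturn, List.findIdx?_cons]; simp [hr]; exact hj
        rw [goB_eq_some h1, goB_eq_some hj]
        simp only [List.take_succ_cons, List.drop_succ_cons, List.filter_cons]
        by_cases hc : (evGet ev "event").getD "" = "call"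
        · simp [hc]
        · simp [hc]

theorem fA_eq_goB (l : List (List (String × String))) :
    ∀ cur, fA cur l = match goB l with
      | [] => []
      | s :: t => (cur ++ s) :: t := by
  induction l with
  | nil => intro cur; simp [fA, goB_nil]
  | cons ev rest ih =>
      intro cur
      rw [goB_cons]
      by_cases hr : (evGet ev "event").getD "" = "return"
      · have hc : ¬ (evGet ev "event").getD "" = "call" := by rw [hr]; decide
        simp [fA, hr, ih []]
        cases goB rest <;> simp
      · by_cases hc : (evGet ev "event").getD "" = "call"
        · simp only [fA, ih, hc]
          cases goB rest <;> simp
        · simp only [fA, ih, hc, hr, if_false]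
          cases goB rest <;> simp

-- ===== VERDICT (by name: the statement is the Claim_ definition above) =====
theorem analyze_runtime_data_spec : Claim_equal_analyze_runtime_data := by
  intro rd _ _
  unfold Spec_analyze_runtime_data analyze_runtime_data analyze_runtime_data_alt
  rw [foldl_fA rd [] [], fA_eq_goB]
  cases goB rd <;> simp
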